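-- pv_equiv track=rewrite | github.com/nishu2613/Klebsiellae_pneumoniae | codes/extract_mutations_06.py | map_alignment_to_original_positions
-- ===== SOURCE A (Python) =====
-- def map_alignment_to_original_positions(query_sequence):
--     position_map = []
--     original_pos = 0
--     for aa in query_sequence:
--         if aa == "-":
--             position_map.append(None)
--         else:
--             original_pos += 1
--             position_map.append(original_pos)
--     return position_map
-- ===== SOURCE B (Python) =====
-- def map_alignment_to_original_positions(query_sequence):
--     # pass 1: prefix-count table of non-gap characters
--     counts = []
--     c = 0
--     for aa in query_sequence:
--         if aa != "-":
--             c += 1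
--         counts.append(c)
--     # pass 2: map each char with its cumulative count
--     return [None if aa == "-" else c for aa, c in zip(query_sequence, counts)]
-- ===== Notes on version B (the rewrite author's own statement) =====
-- stated objective: alternative
-- what changed: A's single fused loop that increments a counter and appends the result is split into two passes: first a prefix-count table of non-gap characters is materialized, then a zip comprehension emits None for gaps and the cumulative count otherwise.
import Mathlib
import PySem

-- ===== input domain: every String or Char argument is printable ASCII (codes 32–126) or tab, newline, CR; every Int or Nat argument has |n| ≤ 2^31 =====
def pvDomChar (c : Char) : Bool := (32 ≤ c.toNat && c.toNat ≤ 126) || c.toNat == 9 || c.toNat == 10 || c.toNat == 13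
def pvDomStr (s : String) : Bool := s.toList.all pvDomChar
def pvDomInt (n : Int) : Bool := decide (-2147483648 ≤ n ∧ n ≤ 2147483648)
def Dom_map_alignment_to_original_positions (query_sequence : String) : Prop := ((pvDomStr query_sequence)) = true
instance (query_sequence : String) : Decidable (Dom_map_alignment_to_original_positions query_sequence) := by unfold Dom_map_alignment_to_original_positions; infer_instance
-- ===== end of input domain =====

-- B splits A's fused count-and-append loop into a prefix-count table pass plus a zip mapping pass (alternative decomposition; same O(n) cost).


-- ===== PORT A =====
-- A's loop: one pass keeping original_pos, appending None or the incremented counter.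
def pvALoop : List Char → Int → List (Option Int)
  | [], _ => []
  | aa :: rest, original_pos =>
    if aa = '-' then none :: pvALoop rest original_pos
    else some (original_pos + 1) :: pvALoop rest (original_pos + 1)

def map_alignment_to_original_positions (query_sequence : String) : List (Option Int) :=
  pvALoop query_sequence.toList 0

-- ===== PORT B =====
-- B pass 1: prefix-count table of non-gap characters.
def pvBCounts : List Char → Int → List Int
  | [], _ => []
  | aa :: rest, c =>
    let c' := if aa ≠ '-' then c + 1 else c
    c' :: pvBCounts rest c'

-- B pass 2: zip the characters with their cumulative counts.
def map_alignment_to_original_positions_alt (query_sequence : String) : List (Option Int) :=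
  let cs := query_sequence.toList
  List.zipWith (fun aa c => if aa = '-' then none else some c) cs (pvBCounts cs 0)

-- ===== PRECONDITION & SPEC =====
def Spec_map_alignment_to_original_positions (query_sequence : String) (out : List (Option Int)) : Prop := out = map_alignment_to_original_positions_alt query_sequence
instance (query_sequence : String) (out : List (Option Int)) : Decidable (Spec_map_alignment_to_original_positions query_sequence out) := by unfold Spec_map_alignment_to_original_positions; infer_instance

-- ===== CLAIM (what is proved, stated in full; the proofs are below) =====
def Claim_equal_map_alignment_to_original_positions : Prop := ∀ (query_sequence : String), Dom_map_alignment_to_original_positions query_sequence → Spec_map_alignment_to_original_positions query_sequence (map_alignment_to_original_positions query_sequence)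

-- ===== LEMMAS AND PROOFS =====
theorem pvALoop_eq_zip (l : List Char) (c : Int) :
    pvALoop l c = List.zipWith (fun aa c => if aa = '-' then none else some c) l (pvBCounts l c) := by
  induction l generalizing c with
  | nil => rfl
  | cons aa rest ih =>
    by_cases h : aa = '-' <;> simp [pvALoop, pvBCounts, h, ih]

-- ===== VERDICT (by name: the statement is the Claim_ definition above) =====
theorem map_alignment_to_original_positions_spec : Claim_equal_map_alignment_to_original_positions := by
  intro s _
  unfold Spec_map_alignment_to_original_positions map_alignment_to_original_positions map_alignment_to_original_positions_alt
  exact pvALoop_eq_zip s.toList 0
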